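-- pv_equiv track=rewrite | github.com/DanielHara/leetcode-solutions | solutions/2216.py | minDeletion
-- ===== SOURCE A (Python) =====
-- from typing import List
--
-- def minDeletion(nums: List[int]) -> int:
--     result = 0
--     i = 0
--     while i < len(nums):
--         j = i + 1
--
--         while j < len(nums) and nums[j] == nums[i]:
--             j = j + 1
--
--         if j >= len(nums):
--             result = result + j - i
--             return result
--
--         result = result + j - i - 1
--         i = j + 1
--
--     return result
-- ===== SOURCE B (Python) =====
-- def minDeletion(nums):
--     # Single left-to-right pass keeping a "pending" first element of the
--     # current surviving pair instead of index-based run skipping.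
--     deletions = 0
--     pending = None
--     for x in nums:
--         if pending is None:
--             pending = x
--         elif x == pending:
--             deletions += 1
--         else:
--             pending = None
--     if pending is not None:
--         deletions += 1
--     return deletions
-- ===== Notes on version B (the rewrite author's own statement) =====
-- stated objective: simpler
-- what changed: Replaced A's index-based nested-while run-skipping greedy with a single element-wise pass that keeps a 'pending' pair-opening element and counts deletions, plus a final dangling-element fixup.
import Mathlib
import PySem

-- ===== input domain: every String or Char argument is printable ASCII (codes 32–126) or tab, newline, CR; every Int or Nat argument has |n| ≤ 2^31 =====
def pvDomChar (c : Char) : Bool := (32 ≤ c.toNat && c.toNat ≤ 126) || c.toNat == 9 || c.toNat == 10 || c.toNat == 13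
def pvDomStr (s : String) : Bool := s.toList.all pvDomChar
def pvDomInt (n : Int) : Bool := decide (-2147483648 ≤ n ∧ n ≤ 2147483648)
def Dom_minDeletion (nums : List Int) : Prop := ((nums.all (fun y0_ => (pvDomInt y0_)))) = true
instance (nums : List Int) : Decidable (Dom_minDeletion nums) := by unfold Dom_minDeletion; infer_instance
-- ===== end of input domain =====

-- B replaces A's index-based nested-while run-skipping greedy with a single
-- element-wise pass maintaining a pending pair-opening element (simpler decomposition, same O(n) cost).


-- ===== PORT A =====
-- inner while 'j = j + 1 while j < len(nums) and nums[j] == nums[i]' (indices guarded, so getD is exact)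
def skipA (nums : List Int) (i j : Nat) : Nat :=
  if _h : j < nums.length then
    if nums.getD j 0 = nums.getD i 0 then skipA nums i (j + 1) else j
  else j
termination_by nums.length - j


-- 'skipA never moves left', needed for loopA's termination
theorem skipA_ge (nums : List Int) (i j : Nat) : j ≤ skipA nums i j := by
  unfold skipA
  split
  · split
    · exact Nat.le_trans (Nat.le_succ j) (skipA_ge nums i (j + 1))
    · exact Nat.le_refl j
  · exact Nat.le_refl j
termination_by nums.length - j


-- outer while over i
def loopA (nums : List Int) (i : Nat) (result : Int) : Int :=
  if _h : i < nums.length then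
    let j := skipA nums i (i + 1)
    if nums.length ≤ j then result + (j : Int) - (i : Int)
    else loopA nums (j + 1) (result + (j : Int) - (i : Int) - 1)
  else result
termination_by nums.length - i
decreasing_by
  have := skipA_ge nums i (i + 1)
  omega


def minDeletion (nums : List Int) : Int := loopA nums 0 0

-- ===== PORT B =====
-- loop body: pending pair-opening element (Option) + deletion counter
def stepB (s : Int × Option Int) (x : Int) : Int × Option Int :=
  match s.2 with
  | none => (s.1, some x)
  | some v => if x = v then (s.1 + 1, some v) else (s.1, none)

def minDeletion_alt (nums : List Int) : Int :=
  let s := nums.foldl stepB (0, none)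
  match s.2 with
  | some _ => s.1 + 1
  | none => s.1

-- ===== PRECONDITION & SPEC =====
def Spec_minDeletion (nums : List Int) (out : Int) : Prop := out = minDeletion_alt nums
instance (nums : List Int) (out : Int) : Decidable (Spec_minDeletion nums out) := by unfold Spec_minDeletion; infer_instance

-- ===== CLAIM (what is proved, stated in full; the proofs are below) =====
def Claim_equal_minDeletion : Prop := ∀ (nums : List Int), Dom_minDeletion nums → Spec_minDeletion nums (minDeletion nums)

-- ===== LEMMAS AND PROOFS =====

-- B's fold-and-fixup started fresh on a list
def gB (xs : List Int) : Int :=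
  let s := xs.foldl stepB (0, none)
  match s.2 with
  | some _ => s.1 + 1
  | none => s.1


theorem foldl_stepB_add (xs : List Int) (d : Int) (p : Option Int) :
    xs.foldl stepB (d, p) =
      (d + (xs.foldl stepB (0, p)).1, (xs.foldl stepB (0, p)).2) := by
  induction xs generalizing d p with
  | nil => simp
  | cons x xs ih =>
    simp only [List.foldl_cons]
    cases p with
    | none =>
      simp only [stepB]
      exact ih d (some x)
    | some v =>
      by_cases hv : x = v
      · simp only [stepB, if_pos hv]
        rw [ih (d + 1) (some v), ih (0 + 1) (some v)]
        simp only [Prod.mk.injEq]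
        exact ⟨by ring, trivial⟩
      · simp only [stepB, if_neg hv]
        exact ih d none


theorem foldl_stepB_replicate (t : Nat) (v : Int) :
    (List.replicate t v).foldl stepB (0, some v) = ((t : Int), some v) := by
  induction t with
  | zero => simp
  | succ n ih =>
    rw [List.replicate_succ, List.foldl_cons]
    have hstep : stepB (0, some v) v = (1, some v) := by simp [stepB]
    rw [hstep, foldl_stepB_add, ih]
    simp only [Prod.mk.injEq]
    exact ⟨by push_cast; ring, trivial⟩


theorem skipA_eq (nums : List Int) (i j : Nat) :
    skipA nums i j =
      j + ((nums.drop j).takeWhile (fun x => x == nums.getD i 0)).length := by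
  unfold skipA
  split
  · rename_i h
    have hd : nums.drop j = nums.getD j 0 :: nums.drop (j + 1) := by
      rw [List.getD_eq_getElem _ _ h]
      exact (List.drop_eq_getElem_cons h)
    split
    · rename_i he
      rw [skipA_eq nums i (j + 1), hd, List.takeWhile_cons]
      simp only [he, beq_self_eq_true, if_pos]
      simp
      omega
    · rename_i he
      rw [hd, List.takeWhile_cons]
      simp only [List.getD] at he
      simp [he]
  · rename_i h
    rw [List.drop_eq_nil_of_le (by omega)]
    simp
termination_by nums.length - j


theorem loopA_eq_gB (nums : List Int) (i : Nat) (r : Int) :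
    loopA nums i r = r + gB (nums.drop i) := by
  by_cases h : i < nums.length
  · have hd : nums.drop i = nums.getD i 0 :: nums.drop (i + 1) := by
      rw [List.getD_eq_getElem _ _ h]; exact List.drop_eq_getElem_cons h
    have hrepl : (nums.drop (i+1)).takeWhile (fun x => x == nums.getD i 0)
        = List.replicate ((nums.drop (i+1)).takeWhile (fun x => x == nums.getD i 0)).length (nums.getD i 0) := by
      apply List.eq_replicate_of_mem
      intro b hb
      simpa using List.mem_takeWhile_imp hb
    have hsplit : ((nums.drop (i+1)).takeWhile (fun x => x == nums.getD i 0))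
        ++ ((nums.drop (i+1)).dropWhile (fun x => x == nums.getD i 0)) = nums.drop (i+1) :=
      List.takeWhile_append_dropWhile
    have hTle : ((nums.drop (i+1)).takeWhile (fun x => x == nums.getD i 0)).length
        + ((nums.drop (i+1)).dropWhile (fun x => x == nums.getD i 0)).length
        = nums.length - (i+1) := by
      have := congrArg List.length hsplit
      simp only [List.length_append, List.length_drop] at this
      exact this
    have hskip : skipA nums i (i + 1)
        = i + 1 + ((nums.drop (i+1)).takeWhile (fun x => x == nums.getD i 0)).length :=
      skipA_eq nums i (i + 1)
    unfold loopA
    rw [dif_pos h]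
    simp only [hskip]
    split
    · rename_i hge
      have hDv : (nums.drop (i+1)).dropWhile (fun x => x == nums.getD i 0) = [] :=
        List.eq_nil_of_length_eq_zero (by omega)
      have hgv : gB (nums.drop i)
          = ((((nums.drop (i+1)).takeWhile (fun x => x == nums.getD i 0)).length : Int) + 1) := by
        unfold gB
        rw [hd]
        conv_lhs => rw [← hsplit, hDv, List.append_nil]
        simp only [List.foldl_cons, stepB]
        conv_lhs => rw [hrepl]
        rw [foldl_stepB_replicate]
      rw [hgv]
      have hlen : nums.length = i + 1 + ((nums.drop (i+1)).takeWhile (fun x => x == nums.getD i 0)).length := by omega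
      push_cast
      omega
    · rename_i hlt
      have hne : (nums.drop (i+1)).dropWhile (fun x => x == nums.getD i 0) ≠ [] := by
        intro hc
        rw [hc] at hTle
        simp only [List.length_nil, Nat.add_zero] at hTle
        omega
      obtain ⟨w, rest', hw⟩ := List.exists_cons_of_ne_nil hne
      have hwne : (w == nums.getD i 0) = false := by
        have hh := List.head_dropWhile_not (fun x => x == nums.getD i 0) hne
        have h1 : ((nums.drop (i+1)).dropWhile (fun x => x == nums.getD i 0)).head? = some w := by
          rw [hw]; rfl
        rw [List.head?_eq_some_head hne, Option.some_inj] at h1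
        rw [h1] at hh
        simpa using hh
      have hdrop1 : nums.drop (i + 1 + ((nums.drop (i+1)).takeWhile (fun x => x == nums.getD i 0)).length)
          = (nums.drop (i+1)).dropWhile (fun x => x == nums.getD i 0) := by
        have e1 : nums.drop (i + 1 + ((nums.drop (i+1)).takeWhile (fun x => x == nums.getD i 0)).length)
            = (nums.drop (i+1)).drop ((nums.drop (i+1)).takeWhile (fun x => x == nums.getD i 0)).length := by
          rw [List.drop_drop]
        have h2 : (((nums.drop (i+1)).takeWhile (fun x => x == nums.getD i 0))
              ++ ((nums.drop (i+1)).dropWhile (fun x => x == nums.getD i 0))).drop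
              ((nums.drop (i+1)).takeWhile (fun x => x == nums.getD i 0)).length
            = (nums.drop (i+1)).dropWhile (fun x => x == nums.getD i 0) := List.drop_left
        rw [hsplit] at h2
        rw [e1, h2]
      have hdrop2 : nums.drop (i + 1 + ((nums.drop (i+1)).takeWhile (fun x => x == nums.getD i 0)).length + 1)
          = rest' := by
        have e1 : nums.drop (i + 1 + ((nums.drop (i+1)).takeWhile (fun x => x == nums.getD i 0)).length + 1)
            = (nums.drop (i + 1 + ((nums.drop (i+1)).takeWhile (fun x => x == nums.getD i 0)).length)).drop 1 := by
          rw [List.drop_drop]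
        rw [e1, hdrop1, hw, List.drop_one, List.tail_cons]
      have ihx := loopA_eq_gB nums (i + 1 + ((nums.drop (i+1)).takeWhile (fun x => x == nums.getD i 0)).length + 1)
          (r + (↑(i + 1 + ((nums.drop (i+1)).takeWhile (fun x => x == nums.getD i 0)).length) : Int) - (i : Int) - 1)
      rw [ihx, hdrop2]
      have hgv : gB (nums.drop i)
          = ((((nums.drop (i+1)).takeWhile (fun x => x == nums.getD i 0)).length : Int)) + gB rest' := by
        unfold gB
        rw [hd]
        conv_lhs => rw [← hsplit, hw]
        simp only [List.foldl_cons, List.foldl_append, stepB]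
        conv_lhs => rw [hrepl]
        rw [foldl_stepB_replicate]
        simp only [hwne]
        rw [if_neg (by intro hc; rw [hc] at hwne; simp at hwne)]
        rw [foldl_stepB_add]
        cases hfs : (rest'.foldl stepB (0, none)).2 with
        | none => simp [hfs]
        | some u => simp [hfs]; ring
      rw [hgv]
      push_cast
      ring
  · unfold loopA
    rw [dif_neg h]
    rw [List.drop_eq_nil_of_le (by omega)]
    simp [gB]
termination_by nums.length - i
decreasing_by omega

-- ===== VERDICT (by name: the statement is the Claim_ definition above) =====
theorem minDeletion_spec : Claim_equal_minDeletion := by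
  intro nums _
  unfold Spec_minDeletion minDeletion minDeletion_alt
  rw [loopA_eq_gB]
  simp [gB]
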